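-- pv_equiv track=rewrite | github.com/isaacsultan/COMP550 | src/evaluation.py | indices_gen
-- ===== SOURCE A (Python) =====
-- def indices_gen(array_length):
--     index = 0
--     indices = []
--     for i in range(array_length):
--         indices.append(index)
--         if (i + 1) % 10 == 0:
--             index += 1
--     return indices
-- ===== SOURCE B (Python) =====
-- def indices_gen(array_length):
--     return [i // 10 for i in range(array_length)]
-- ===== Notes on version B (the rewrite author's own statement) =====
-- stated objective: simpler
-- what changed: Replaces the threaded running counter with its modulo-branch increment by a stateless comprehension computing each element directly as i // 10.
import Mathlib
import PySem

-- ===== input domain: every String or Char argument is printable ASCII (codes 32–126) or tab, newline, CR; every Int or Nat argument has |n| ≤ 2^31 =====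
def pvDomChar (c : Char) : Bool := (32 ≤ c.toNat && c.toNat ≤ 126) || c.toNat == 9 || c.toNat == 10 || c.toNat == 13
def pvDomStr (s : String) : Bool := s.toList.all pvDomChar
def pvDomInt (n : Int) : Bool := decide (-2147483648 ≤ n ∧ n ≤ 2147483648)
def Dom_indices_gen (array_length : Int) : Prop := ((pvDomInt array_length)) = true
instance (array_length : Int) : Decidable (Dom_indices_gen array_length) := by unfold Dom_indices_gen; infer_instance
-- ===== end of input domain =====

-- B replaces A's running counter and modulo branch with a stateless per-index
-- closed form i // 10 (objective: simpler; same O(n) cost).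

-- ===== PORT A =====
-- the loop state is (index, indices); each step appends index, then
-- increments it when (i+1) % 10 == 0, exactly as the Python loop
def indices_gen (array_length : Int) : List Int :=
  ((PySem.List.pyRange 0 array_length 1).foldl
    (fun (st : Int × List Int) i =>
      let st' : Int × List Int := (st.1, st.2 ++ [st.1])
      if PySem.Int.mod (i + 1) 10 = 0 then (st'.1 + 1, st'.2) else st')
    (0, [])).2

-- ===== PORT B =====
def indices_gen_alt (array_length : Int) : List Int :=
  (PySem.List.pyRange 0 array_length 1).map (fun i => PySem.Int.floordiv i 10)

-- ===== PRECONDITION & SPEC =====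
def Spec_indices_gen (array_length : Int) (out : List Int) : Prop := out = indices_gen_alt array_length
instance (array_length : Int) (out : List Int) : Decidable (Spec_indices_gen array_length out) := by unfold Spec_indices_gen; infer_instance

-- ===== CLAIM (what is proved, stated in full; the proofs are below) =====
def Claim_equal_indices_gen : Prop := ∀ (array_length : Int), Dom_indices_gen array_length → Spec_indices_gen array_length (indices_gen array_length)

-- ===== LEMMAS AND PROOFS =====

-- loop invariant: after processing i = 0 .. m-1, the counter is m / 10 and
-- the accumulated list is [0/10, 1/10, …, (m-1)/10]
theorem indices_gen_loop_inv (m : Nat) :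
    ((List.range m).map (fun k : Nat => ((0 : Int) + k))).foldl
      (fun (st : Int × List Int) i =>
        let st' : Int × List Int := (st.1, st.2 ++ [st.1])
        if PySem.Int.mod (i + 1) 10 = 0 then (st'.1 + 1, st'.2) else st')
      (0, []) =
    (((m / 10 : Nat) : Int), (List.range m).map (fun k : Nat => ((k / 10 : Nat) : Int))) := by
  induction m with
  | zero => simp
  | succ m ih =>
    rw [List.range_succ, List.map_append, List.foldl_append, ih]
    simp only [List.map_cons, List.map_nil, List.foldl_cons, List.foldl_nil]
    have hm : ((0 : Int) + (m : Int) + 1) = ((m + 1 : Nat) : Int) := by push_cast; ring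
    rw [hm, show (10:Int) = ((10:Nat):Int) from rfl, PySem.Int.mod_natCast]
    by_cases h : (m + 1) % 10 = 0
    · have : (((m + 1) % 10 : Nat) : Int) = 0 := by exact_mod_cast congrArg Nat.cast h
      simp only [this, if_pos]
      have : (m + 1) / 10 = m / 10 + 1 := by omega
      simp [this]
    · have hne : (((m + 1) % 10 : Nat) : Int) ≠ 0 := by exact_mod_cast h
      simp only [if_neg hne]
      have : (m + 1) / 10 = m / 10 := by omega
      simp [this]

-- ===== VERDICT (by name: the statement is the Claim_ definition above) =====
theorem indices_gen_spec : Claim_equal_indices_gen := by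
  intro n _
  unfold Spec_indices_gen indices_gen indices_gen_alt
  rw [PySem.List.pyRange_one, indices_gen_loop_inv]
  simp only [List.map_map]
  refine List.map_congr_left (fun k _ => ?_)
  simp only [Function.comp_apply, zero_add]
  exact (PySem.Int.floordiv_natCast k 10).symm
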